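-- pv_equiv track=rewrite | github.com/feroliverjane/lluch-regulation | backend/app/services/blue_line_rules.py | apply_worst_case_logic
-- ===== SOURCE A (Python) =====
-- from typing import Dict, List, Any, Optional
-- from enum import Enum
--
-- class WorstCaseHierarchy(str, Enum):
--     """Worst case hierarchies for boolean/trilean fields"""
--     YES_NA_NO = "YES_NA_NO"  # Yes worst, NA middle, No best
--     NO_NA_YES = "NO_NA_YES"  # No worst, NA middle, Yes best
--
-- def apply_worst_case_logic(values: List[Any], hierarchy: WorstCaseHierarchy) -> str:
--     """
--     Apply WORST_CASE logic: use worst value according to hierarchy.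
--
--     Args:
--         values: List of values (Yes/No/NA)
--         hierarchy: Which hierarchy to use
--
--     Returns:
--         Worst case value
--     """
--     # Normalize values
--     normalized = []
--     for v in values:
--         if v is None:
--             continue
--         v_str = str(v).upper().strip()
--         if v_str in ["YES", "Y", "1", "TRUE"]:
--             normalized.append("Yes")
--         elif v_str in ["NO", "N", "0", "FALSE"]:
--             normalized.append("No")
--         elif v_str in ["NA", "N/A", "NOT APPLICABLE"]:
--             normalized.append("NA")
--
--     if not normalized:
--         return "NA"
--
--     # Apply hierarchy
--     if hierarchy == WorstCaseHierarchy.YES_NA_NO: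
--         # Yes is worst
--         if "Yes" in normalized:
--             return "Yes"
--         elif "NA" in normalized:
--             return "NA"
--         else:
--             return "No"
--     else:  # NO_NA_YES
--         # No is worst
--         if "No" in normalized:
--             return "No"
--         elif "NA" in normalized:
--             return "NA"
--         else:
--             return "Yes"
-- ===== SOURCE B (Python) =====
-- def apply_worst_case_logic(values, hierarchy):
--     yes_worst = (hierarchy == "YES_NA_NO")
--     best = None
--     for v in values:
--         if v is None:
--             continue
--         s = str(v).upper().strip()
--         if s in ("YES", "Y", "1", "TRUE"):
--             r = 2 if yes_worst else 0
--         elif s in ("NO", "N", "0", "FALSE"):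
--             r = 0 if yes_worst else 2
--         elif s in ("NA", "N/A", "NOT APPLICABLE"):
--             r = 1
--         else:
--             continue
--         best = r if best is None else max(best, r)
--     if best is None:
--         return "NA"
--     if best == 2:
--         return "Yes" if yes_worst else "No"
--     if best == 1:
--         return "NA"
--     return "No" if yes_worst else "Yes"
-- ===== Notes on version B (the rewrite author's own statement) =====
-- stated objective: alternative
-- what changed: Replaces building a normalized list and then running up to two membership scans per hierarchy with a single pass keeping a running maximum 'badness' rank (worst=2, NA=1, best=0) that is mapped back to a token at the end.
import Mathlib
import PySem

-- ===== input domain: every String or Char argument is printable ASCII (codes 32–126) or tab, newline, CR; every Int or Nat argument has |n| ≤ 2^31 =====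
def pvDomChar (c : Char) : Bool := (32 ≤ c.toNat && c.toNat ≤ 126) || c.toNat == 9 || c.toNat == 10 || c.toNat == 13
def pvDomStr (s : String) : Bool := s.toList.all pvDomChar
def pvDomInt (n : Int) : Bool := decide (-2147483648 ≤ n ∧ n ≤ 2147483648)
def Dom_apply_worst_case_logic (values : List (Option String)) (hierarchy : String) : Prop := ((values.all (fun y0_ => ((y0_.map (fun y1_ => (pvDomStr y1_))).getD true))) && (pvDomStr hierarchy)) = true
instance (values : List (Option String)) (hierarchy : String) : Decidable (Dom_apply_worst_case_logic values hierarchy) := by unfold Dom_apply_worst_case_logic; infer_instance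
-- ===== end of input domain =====

-- B replaces A's normalized-list building plus per-hierarchy membership scans with a single pass
-- keeping a running maximum "badness" rank, mapped back to a token at the end (alternative, same cost).

-- ===== PORT A =====
-- A's loop body: normalize one value and append its token (Lean helper for the inline loop body)
def pvStepA (acc : List String) (v : Option String) : List String :=
  match v with
  | none => acc
  | some s =>
    let v_str := PySem.Str.strip (PySem.Str.upper s)
    if v_str ∈ ["YES", "Y", "1", "TRUE"] then acc ++ ["Yes"]
    else if v_str ∈ ["NO", "N", "0", "FALSE"] then acc ++ ["No"]
    else if v_str ∈ ["NA", "N/A", "NOT APPLICABLE"] then acc ++ ["NA"]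
    else acc

-- literal transliteration of A: build the normalized list, then membership tests per hierarchy
def apply_worst_case_logic (values : List (Option String)) (hierarchy : String) : String :=
  let normalized := values.foldl pvStepA []
  if normalized = [] then "NA"
  else if hierarchy = "YES_NA_NO" then
    if "Yes" ∈ normalized then "Yes"
    else if "NA" ∈ normalized then "NA"
    else "No"
  else
    if "No" ∈ normalized then "No"
    else if "NA" ∈ normalized then "NA"
    else "Yes"

-- ===== PORT B =====
-- B's loop body: normalize one value, compute its rank (skip when unrecognized), update running max
def pvStepB (yesWorst : Bool) (best : Option Nat) (v : Option String) : Option Nat :=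
  match v with
  | none => best
  | some s =>
    let vs := PySem.Str.strip (PySem.Str.upper s)
    match (if vs ∈ ["YES", "Y", "1", "TRUE"] then some (if yesWorst then 2 else 0)
           else if vs ∈ ["NO", "N", "0", "FALSE"] then some (if yesWorst then 0 else 2)
           else if vs ∈ ["NA", "N/A", "NOT APPLICABLE"] then some 1
           else none : Option Nat) with
    | none => best
    | some r => some (match best with | none => r | some m => max m r)

-- literal transliteration of Source B: one pass keeping the maximum badness rank as Option Nat
def apply_worst_case_logic_alt (values : List (Option String)) (hierarchy : String) : String :=
  let yesWorst : Bool := hierarchy == "YES_NA_NO"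
  let best := values.foldl (pvStepB yesWorst) none
  match best with
  | none => "NA"
  | some b =>
    if b = 2 then (if yesWorst then "Yes" else "No")
    else if b = 1 then "NA"
    else (if yesWorst then "No" else "Yes")

-- ===== PRECONDITION & SPEC =====
def Spec_apply_worst_case_logic (values : List (Option String)) (hierarchy : String) (out : String) : Prop := out = apply_worst_case_logic_alt values hierarchy
instance (values : List (Option String)) (hierarchy : String) (out : String) : Decidable (Spec_apply_worst_case_logic values hierarchy out) := by unfold Spec_apply_worst_case_logic; infer_instance

-- ===== CLAIM (what is proved, stated in full; the proofs are below) =====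
def Claim_equal_apply_worst_case_logic : Prop := ∀ (values : List (Option String)) (hierarchy : String), Dom_apply_worst_case_logic values hierarchy → Spec_apply_worst_case_logic values hierarchy (apply_worst_case_logic values hierarchy)

-- ===== LEMMAS AND PROOFS =====

-- proof-side classifier: the token a value contributes (none = skipped)
def pvClassify (v : Option String) : Option String :=
  match v with
  | none => none
  | some s =>
    let vs := PySem.Str.strip (PySem.Str.upper s)
    if vs ∈ ["YES", "Y", "1", "TRUE"] then some "Yes"
    else if vs ∈ ["NO", "N", "0", "FALSE"] then some "No"
    else if vs ∈ ["NA", "N/A", "NOT APPLICABLE"] then some "NA"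
    else none

-- badness rank of a token for a given hierarchy flag
def pvRk (yw : Bool) (t : String) : Nat :=
  if t = (if yw then "Yes" else "No") then 2 else if t = "NA" then 1 else 0

-- the max fold restricted to tokens
def pvMaxStep (yw : Bool) (best : Option Nat) (t : String) : Option Nat :=
  some (match best with | none => pvRk yw t | some m => max m (pvRk yw t))

-- A's loop builds acc ++ the classified tokens
theorem pvA_norm (values : List (Option String)) (acc : List String) :
    values.foldl pvStepA acc = acc ++ values.filterMap pvClassify := by
  induction values generalizing acc with
  | nil => simp
  | cons v vs ih =>
    cases v with
    | none => simp [pvStepA, pvClassify, ih]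
    | some s =>
      simp only [List.foldl_cons, List.filterMap_cons, pvStepA, pvClassify]
      split_ifs <;> simp [ih, pvClassify]

-- B's loop equals the max-rank fold over the classified tokens
theorem pvB_fold (yw : Bool) (values : List (Option String)) (st : Option Nat) :
    values.foldl (pvStepB yw) st = (values.filterMap pvClassify).foldl (pvMaxStep yw) st := by
  induction values generalizing st with
  | nil => simp
  | cons v vs ih =>
    cases v with
    | none => simp [pvStepB, pvClassify, ih]
    | some s =>
      cases yw <;>
        simp only [List.foldl_cons, List.filterMap_cons, pvStepB, pvClassify] <;>
        split_ifs <;> simp_all [pvMaxStep, pvRk, pvClassify]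

-- pulling the start value out of a max fold
theorem pvFold_some (yw : Bool) (l : List String) (m : Nat) :
    l.foldl (pvMaxStep yw) (some m) = some (l.foldl (fun a t => max a (pvRk yw t)) m) := by
  induction l generalizing m with
  | nil => rfl
  | cons t l ih => simp [pvMaxStep, ih]

theorem pvMax_shift (yw : Bool) (l : List String) (m : Nat) :
    l.foldl (fun a t => max a (pvRk yw t)) m = max m (l.foldl (fun a t => max a (pvRk yw t)) 0) := by
  induction l generalizing m with
  | nil => simp
  | cons t l ih =>
    simp only [List.foldl_cons]
    rw [ih, ih (max 0 (pvRk yw t))]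
    omega

-- from the empty state, a nonempty token list folds to the max rank over the list
theorem pvFold_none (yw : Bool) (t : String) (rest : List String) :
    (t :: rest).foldl (pvMaxStep yw) none
      = some ((t :: rest).foldl (fun a u => max a (pvRk yw u)) 0) := by
  simp only [List.foldl_cons, pvMaxStep]
  rw [pvFold_some, pvMax_shift yw rest (pvRk yw t), pvMax_shift yw rest (max 0 (pvRk yw t))]
  simp

-- characterisation of the max rank by membership, on valid token lists
theorem pvMax_char (yw : Bool) (l : List String)
    (h : ∀ t ∈ l, t = "Yes" ∨ t = "No" ∨ t = "NA") :
    l.foldl (fun a t => max a (pvRk yw t)) 0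
      = (if (if yw then "Yes" else "No") ∈ l then 2 else if "NA" ∈ l then 1 else 0) := by
  induction l with
  | nil => simp
  | cons t l ih =>
    have ht := h t (by simp)
    have hl := ih (fun x hx => h x (by simp [hx]))
    simp only [List.foldl_cons, List.mem_cons]
    rw [pvMax_shift, hl]
    rcases ht with ht | ht | ht <;> subst ht <;> cases yw <;>
      simp [pvRk] <;> split_ifs <;> simp_all

theorem pvClassify_valid (values : List (Option String)) :
    ∀ t ∈ values.filterMap pvClassify, t = "Yes" ∨ t = "No" ∨ t = "NA" := by
  intro t ht
  simp only [List.mem_filterMap] at ht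
  obtain ⟨v, _, hv⟩ := ht
  cases v with
  | none => simp [pvClassify] at hv
  | some s =>
    simp only [pvClassify] at hv
    split_ifs at hv <;> simp_all

-- ===== VERDICT (by name: the statement is the Claim_ definition above) =====
theorem apply_worst_case_logic_spec : Claim_equal_apply_worst_case_logic := by
  intro values hierarchy _
  unfold Spec_apply_worst_case_logic
  simp only [apply_worst_case_logic, apply_worst_case_logic_alt]
  rw [pvA_norm values [], pvB_fold (hierarchy == "YES_NA_NO") values none]
  simp only [List.nil_append]
  have hvalid := pvClassify_valid values
  rcases hcase : values.filterMap pvClassify with _ | ⟨t, rest⟩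
  · simp
  · rw [hcase] at hvalid
    rw [pvFold_none, pvMax_char _ _ hvalid]
    by_cases hy : hierarchy = "YES_NA_NO" <;>
      simp [hy] <;> split_ifs <;> simp_all
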